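-- pv_equiv track=rewrite | github.com/ds526-student/compx216a3 | assignment3.py | build_bigram
-- ===== SOURCE A (Python) =====
-- import collections
--
-- def build_bigram(sequence):
--     # Task 1.2
--     # Return a bigram model.
--     # counts the number of times a bigram appears in the sequence
--     bigram_count = collections.Counter(zip(sequence, sequence[1:]))
--
--     # calculates the total number of each bigram in the sequence, and returns the model with an inner and outer dictionary
--     model = {}
--     for (word_1, word_2), count in bigram_count.items():
--         if word_1 not in model:
--             model[word_1] = {}
--         model[word_1][word_2] = count
--
--     return model
-- ===== SOURCE B (Python) =====
-- def build_bigram(sequence):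
--     # Group-by decomposition: for each distinct first word (in order of first
--     # appearance), scan all adjacent pairs once to count its followers.
--     pairs = list(zip(sequence, sequence[1:]))
--     model = {}
--     for w1, _ in pairs:
--         if w1 in model:
--             continue
--         followers = {}
--         for u, v in pairs:
--             if u == w1:
--                 followers[v] = followers.get(v, 0) + 1
--         model[w1] = followers
--     return model
-- ===== Notes on version B (the rewrite author's own statement) =====
-- stated objective: alternative
-- what changed: Replaces the global Counter-of-bigrams pass followed by a restructuring loop with a group-by algorithm: an outer loop over distinct first words that, for each one, re-scans the pair list to count its followers (O(k*n) nested scans instead of O(n) counting).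
import Mathlib
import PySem

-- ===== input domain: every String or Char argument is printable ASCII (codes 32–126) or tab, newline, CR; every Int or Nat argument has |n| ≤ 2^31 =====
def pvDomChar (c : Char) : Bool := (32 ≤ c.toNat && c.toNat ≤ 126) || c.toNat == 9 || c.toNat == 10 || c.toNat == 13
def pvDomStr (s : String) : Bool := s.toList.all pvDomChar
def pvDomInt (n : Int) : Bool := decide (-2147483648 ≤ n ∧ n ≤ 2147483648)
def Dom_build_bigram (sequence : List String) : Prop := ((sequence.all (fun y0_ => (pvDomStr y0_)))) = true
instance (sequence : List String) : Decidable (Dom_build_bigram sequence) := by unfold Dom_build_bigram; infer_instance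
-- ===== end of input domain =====

-- B replaces A's global Counter-of-bigrams pass plus restructuring loop with a group-by
-- algorithm: an outer loop over distinct first words that re-scans the pair list to count
-- each word's followers (objective: alternative; B is not claimed faster).

-- ===== PORT A =====
-- sequence[1:] = List.drop 1 (exact: start index 1 ≥ 0); collections.Counter = PySem.Dict.counter.
def build_bigram (sequence : List String) : List (String × List (String × Int)) :=
  let bigram_count : PySem.Dict (String × String) Int :=
    PySem.Dict.counter (sequence.zip (sequence.drop 1))
  let model : PySem.Dict String (PySem.Dict String Int) :=
    bigram_count.items.foldl
      (fun model p =>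
        let model := if model.contains p.1.1 then model else model.insert p.1.1 PySem.Dict.empty
        model.insert p.1.1 ((model.getD p.1.1 PySem.Dict.empty).insert p.1.2 p.2))
      PySem.Dict.empty
  model.items.map (fun p => (p.1, p.2.items))

-- ===== PORT B =====
-- Outer loop over pairs skips already-grouped first words ('continue'); the inner loop
-- re-scans the whole pair list counting followers of p.1 ('followers.get(v, 0) + 1').
def build_bigram_alt (sequence : List String) : List (String × List (String × Int)) :=
  let pairs := sequence.zip (sequence.drop 1)
  let model : PySem.Dict String (PySem.Dict String Int) :=
    pairs.foldl
      (fun model p =>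
        if model.contains p.1 then model
        else
          model.insert p.1
            (pairs.foldl
              (fun followers q =>
                if q.1 == p.1 then followers.insert q.2 (followers.getD q.2 0 + 1)
                else followers)
              PySem.Dict.empty))
      PySem.Dict.empty
  model.items.map (fun p => (p.1, p.2.items))

-- ===== PRECONDITION & SPEC =====
def Spec_build_bigram (sequence : List String) (out : List (String × List (String × Int))) : Prop := out = build_bigram_alt sequence
instance (sequence : List String) (out : List (String × List (String × Int))) : Decidable (Spec_build_bigram sequence out) := by unfold Spec_build_bigram; infer_instance

-- ===== CLAIM (what is proved, stated in full; the proofs are below) =====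
def Claim_equal_build_bigram : Prop := ∀ (sequence : List String), Dom_build_bigram sequence → Spec_build_bigram sequence (build_bigram sequence)

-- ===== LEMMAS AND PROOFS =====

-- A-side loop steps (nstep = A's restructuring step; bstep = the canonical in-place bump both sides are reduced to).
def updN (m : PySem.Dict String (PySem.Dict String Int)) (q : String × String) (v : Int) :
    PySem.Dict String (PySem.Dict String Int) :=
  m.insert q.1 ((m.getD q.1 PySem.Dict.empty).insert q.2 v)
def nstep (m : PySem.Dict String (PySem.Dict String Int)) (p : (String × String) × Int) :
    PySem.Dict String (PySem.Dict String Int) := updN m p.1 p.2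
def bstep (m : PySem.Dict String (PySem.Dict String Int)) (q : String × String) :
    PySem.Dict String (PySem.Dict String Int) :=
  updN m q ((m.getD q.1 PySem.Dict.empty).getD q.2 0 + 1)

-- B-side loop steps.
def innerF (l : List (String × String)) (k : String) : PySem.Dict String Int :=
  l.foldl
    (fun followers q =>
      if q.1 == k then followers.insert q.2 (followers.getD q.2 0 + 1) else followers)
    PySem.Dict.empty
def gstep (l : List (String × String)) (m : PySem.Dict String (PySem.Dict String Int))
    (p : String × String) : PySem.Dict String (PySem.Dict String Int) :=
  if m.contains p.1 then m else m.insert p.1 (innerF l p.1)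

theorem astep_eq (m : PySem.Dict String (PySem.Dict String Int)) (p : (String × String) × Int) :
    (let m' := if m.contains p.1.1 then m else m.insert p.1.1 PySem.Dict.empty;
     m'.insert p.1.1 ((m'.getD p.1.1 PySem.Dict.empty).insert p.1.2 p.2)) = nstep m p := by
  show _ = updN m p.1 p.2
  by_cases hc : m.contains p.1.1 = true
  · simp [hc, updN]
  · simp only [Bool.not_eq_true] at hc
    simp [hc, updN, PySem.Dict.insert_insert_self,
      PySem.Dict.getD_of_not_contains m _ hc]

theorem insert_comm_of_contains {κ ν : Type} [BEq κ] [LawfulBEq κ] (d : PySem.Dict κ ν)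
    (k k' : κ) (v w : ν) (hc : d.contains k = true) (hne : k' ≠ k) :
    (d.insert k v).insert k' w = (d.insert k' w).insert k v := by
  apply PySem.Dict.ext
  by_cases hc' : d.contains k' = true
  · rw [PySem.Dict.items_insert_of_contains _ w (by simp [PySem.Dict.contains_insert, hc']),
      PySem.Dict.items_insert_of_contains _ v hc,
      PySem.Dict.items_insert_of_contains _ v (by simp [PySem.Dict.contains_insert, hc]),
      PySem.Dict.items_insert_of_contains _ w hc',
      List.map_map, List.map_map]
    apply List.map_congr_left
    intro p _
    by_cases h1 : p.1 = k <;> by_cases h2 : p.1 = k' <;>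
      simp_all [Function.comp]
  · simp only [Bool.not_eq_true] at hc'
    rw [PySem.Dict.items_insert_of_not_contains _ w
        (by simp [PySem.Dict.contains_insert, hc', hne]),
      PySem.Dict.items_insert_of_contains _ v hc,
      PySem.Dict.items_insert_of_contains _ v (by simp [PySem.Dict.contains_insert, hc]),
      PySem.Dict.items_insert_of_not_contains _ w hc', List.map_append]
    simp [hne, beq_iff_eq]

theorem contains_of_mem_keys_getD (m : PySem.Dict String (PySem.Dict String Int))
    (q : String × String) (h : q.2 ∈ (m.getD q.1 PySem.Dict.empty).keys) :
    m.contains q.1 = true := by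
  by_contra hc
  rw [PySem.Dict.getD_of_not_contains m _ (by simpa using hc)] at h
  simp [PySem.Dict.keys_empty] at h

theorem updN_comm (m : PySem.Dict String (PySem.Dict String Int))
    (q k : String × String) (v n : Int) (hne : q ≠ k)
    (hq : q.2 ∈ (m.getD q.1 PySem.Dict.empty).keys) :
    updN (updN m q v) k n = updN (updN m k n) q v := by
  by_cases h1 : k.1 = q.1
  · have h2 : k.2 ≠ q.2 := by
      intro h2; exact hne (Prod.ext h1.symm h2.symm)
    unfold updN
    rw [h1]
    rw [PySem.Dict.getD_insert, PySem.Dict.getD_insert]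
    simp only [if_true, PySem.Dict.insert_insert_self]
    congr 1
    exact insert_comm_of_contains _ q.2 k.2 v n
      ((PySem.Dict.contains_iff_mem_keys _ _).2 hq) h2
  · unfold updN
    rw [PySem.Dict.getD_insert, PySem.Dict.getD_insert, if_neg h1,
      if_neg (fun h => h1 h.symm)]
    exact insert_comm_of_contains m q.1 k.1 _ _
      (contains_of_mem_keys_getD m q hq) h1

theorem mem_keys_getD_updN (m : PySem.Dict String (PySem.Dict String Int))
    (q k : String × String) (n : Int) (hq : q.2 ∈ (m.getD q.1 PySem.Dict.empty).keys) :
    q.2 ∈ ((updN m k n).getD q.1 PySem.Dict.empty).keys := by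
  unfold updN
  rw [PySem.Dict.getD_insert]
  by_cases h1 : q.1 = k.1
  · rw [if_pos h1, ← h1]
    exact (PySem.Dict.mem_keys_insert _ _ _ _).2 (Or.inr hq)
  · rwa [if_neg h1]

theorem getD2_updN_ne (m : PySem.Dict String (PySem.Dict String Int))
    (q k : String × String) (n : Int) (hne : k ≠ q) :
    ((updN m k n).getD q.1 PySem.Dict.empty).getD q.2 0
      = (m.getD q.1 PySem.Dict.empty).getD q.2 0 := by
  unfold updN
  rw [PySem.Dict.getD_insert]
  by_cases h1 : q.1 = k.1
  · have h2 : q.2 ≠ k.2 := fun h2 => hne (Prod.ext (h1.symm ▸ rfl) h2.symm)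
    rw [if_pos h1, PySem.Dict.getD_insert, if_neg h2, h1]
  · rw [if_neg h1]

theorem getD2_updN_self (m : PySem.Dict String (PySem.Dict String Int))
    (q : String × String) (v : Int) :
    ((updN m q v).getD q.1 PySem.Dict.empty).getD q.2 0 = v := by
  simp [updN]

theorem updN_updN_same (m : PySem.Dict String (PySem.Dict String Int))
    (q : String × String) (n v : Int) : updN (updN m q n) q v = updN m q v := by
  simp [updN, PySem.Dict.insert_insert_self]

theorem foldl_updN_comm (l : List ((String × String) × Int))
    (m : PySem.Dict String (PySem.Dict String Int)) (q : String × String) (v : Int)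
    (hnot : q ∉ l.map (·.1)) (hq : q.2 ∈ (m.getD q.1 PySem.Dict.empty).keys) :
    l.foldl nstep (updN m q v) = updN (l.foldl nstep m) q v := by
  induction l generalizing m with
  | nil => rfl
  | cons p t ih =>
    simp only [List.map_cons, List.mem_cons, not_or] at hnot
    simp only [List.foldl_cons]
    show t.foldl nstep (nstep (updN m q v) p) = updN (t.foldl nstep (nstep m p)) q v
    rw [show nstep (updN m q v) p = updN (updN m q v) p.1 p.2 from rfl,
        updN_comm m q p.1 v p.2 (fun h => hnot.1 (by rw [h])) hq]
    exact ih (updN m p.1 p.2) hnot.2 (mem_keys_getD_updN m q p.1 p.2 hq)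

theorem map_bump_noop (t : List ((String × String) × Int)) (q : String × String) (v : Int)
    (h : ∀ p ∈ t, p.1 ≠ q) :
    t.map (fun p => if p.1 = q then (q, v) else p) = t := by
  induction t with
  | nil => rfl
  | cons p t ih =>
    simp only [List.map_cons, if_neg (h p (List.mem_cons_self ..)),
      ih (fun p hp => h p (List.mem_cons_of_mem _ hp))]

theorem foldl_updN_bump (l : List ((String × String) × Int))
    (m : PySem.Dict String (PySem.Dict String Int)) (q : String × String) (v : Int)
    (hnd : (l.map (·.1)).Nodup) (hmem : q ∈ l.map (·.1)) :
    (l.map (fun p => if p.1 = q then (q, v) else p)).foldl nstep m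
      = updN (l.foldl nstep m) q v := by
  induction l generalizing m with
  | nil => simp at hmem
  | cons p t ih =>
    simp only [List.map_cons, List.nodup_cons] at hnd
    by_cases hk : p.1 = q
    · have hnotq : ∀ r ∈ t, r.1 ≠ q := by
        intro r hr h
        exact hnd.1 (hk ▸ h ▸ List.mem_map_of_mem hr)
      simp only [List.map_cons, if_pos hk, List.foldl_cons, map_bump_noop t q v hnotq]
      show t.foldl nstep (updN m q v) = updN (t.foldl nstep (updN m p.1 p.2)) q v
      rw [hk, ← updN_updN_same m q p.2 v]
      exact foldl_updN_comm t (updN m q p.2) q v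
        (fun h => hnd.1 (hk ▸ h)) (by
          simp only [updN, PySem.Dict.getD_insert]
          exact (PySem.Dict.mem_keys_insert _ _ _ _).2 (Or.inl rfl))
    · have hmem' : q ∈ t.map (·.1) := by
        rcases List.mem_cons.1 hmem with h | h
        · exact absurd h.symm hk
        · exact h
      simp only [List.map_cons, if_neg hk, List.foldl_cons]
      exact ih (nstep m p) hnd.2 hmem'

theorem getD2_foldl_not_mem (l : List ((String × String) × Int))
    (m : PySem.Dict String (PySem.Dict String Int)) (q : String × String)
    (h : q ∉ l.map (·.1)) :
    ((l.foldl nstep m).getD q.1 PySem.Dict.empty).getD q.2 0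
      = (m.getD q.1 PySem.Dict.empty).getD q.2 0 := by
  induction l generalizing m with
  | nil => rfl
  | cons p t ih =>
    simp only [List.map_cons, List.mem_cons, not_or] at h
    rw [List.foldl_cons, ih _ h.2]
    exact getD2_updN_ne m q p.1 p.2 (fun hh => h.1 (by rw [hh]))

theorem getD2_foldl_mem (l : List ((String × String) × Int))
    (m : PySem.Dict String (PySem.Dict String Int)) (q : String × String) (v : Int)
    (hnd : (l.map (·.1)).Nodup) (hmem : (q, v) ∈ l) :
    ((l.foldl nstep m).getD q.1 PySem.Dict.empty).getD q.2 0 = v := by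
  induction l generalizing m with
  | nil => simp at hmem
  | cons p t ih =>
    simp only [List.map_cons, List.nodup_cons] at hnd
    rcases List.mem_cons.1 hmem with h | h
    · subst h
      rw [List.foldl_cons, getD2_foldl_not_mem t _ q (by simpa using hnd.1)]
      exact getD2_updN_self m q v
    · rw [List.foldl_cons]
      exact ih (nstep m p) hnd.2 h

theorem nest_counter (qs : List (String × String)) :
    (PySem.Dict.counter qs).items.foldl nstep PySem.Dict.empty
      = qs.foldl bstep PySem.Dict.empty := by
  induction qs using List.reverseRecOn with
  | nil => rfl
  | append_singleton xs q ih =>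
    have hnd : ((PySem.Dict.counter xs).items.map (·.1)).Nodup := by
      have h := PySem.Dict.nodup_keys_counter xs
      simpa only [PySem.Dict.keys] using h
    rw [List.foldl_append, List.foldl_cons, List.foldl_nil, ← ih]
    by_cases hmem : q ∈ xs
    · have hset : PySem.Set.ofList (xs ++ [q]) = PySem.Set.ofList xs := by
        rw [PySem.Set.ofList_append, PySem.Set.update_eq_append_filter]
        have : PySem.Set.contains (PySem.Set.ofList xs) q = true :=
          List.elem_eq_true_of_mem ((PySem.Set.mem_ofList xs q).2 hmem)
        simp [PySem.Set.contains] at this ⊢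
        simpa using this
      have hitems : (PySem.Dict.counter (xs ++ [q])).items
          = (PySem.Dict.counter xs).items.map
              (fun p => if p.1 = q then (q, (xs.count q : Int) + 1) else p) := by
        rw [PySem.Dict.items_counter, PySem.Dict.items_counter, List.map_map, hset]
        apply List.map_congr_left
        intro k hk
        by_cases hkq : k = q
        · subst hkq
          simp [Function.comp, List.count_append]
        · have hqk : ¬ q = k := fun h => hkq h.symm
          simp [Function.comp, hkq, List.count_append, hqk]
      have hqmem : q ∈ (PySem.Dict.counter xs).items.map (·.1) := by
        rw [PySem.Dict.items_counter, List.map_map]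
        simpa using (PySem.Set.mem_ofList xs q).2 hmem
      rw [hitems, foldl_updN_bump _ _ q _ hnd hqmem]
      show _ = bstep _ q
      unfold bstep
      rw [getD2_foldl_mem _ _ q (xs.count q : Int) hnd (by
        rw [PySem.Dict.items_counter]
        exact List.mem_map_of_mem ((PySem.Set.mem_ofList xs q).2 hmem))]
    · have hset : PySem.Set.ofList (xs ++ [q]) = PySem.Set.ofList xs ++ [q] := by
        rw [PySem.Set.ofList_append]
        exact PySem.Set.update_eq_append_of_disjoint _ [q] (by simp)
          (by simpa using fun h => hmem ((PySem.Set.mem_ofList xs q).1 h))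
      have hitems : (PySem.Dict.counter (xs ++ [q])).items
          = (PySem.Dict.counter xs).items ++ [(q, (1 : Int))] := by
        rw [PySem.Dict.items_counter, PySem.Dict.items_counter, hset, List.map_append]
        congr 1
        · apply List.map_congr_left
          intro k hk
          have hkq : ¬ q = k := fun h =>
            hmem (h ▸ (PySem.Set.mem_ofList xs k).1 hk)
          simp [List.count_append, hkq]
        · simp [List.count_append, List.count_singleton,
            List.count_eq_zero_of_not_mem hmem]
      rw [hitems, List.foldl_append, List.foldl_cons, List.foldl_nil]
      have h0 : ((List.foldl nstep PySem.Dict.empty (PySem.Dict.counter xs).items).getD q.1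
          PySem.Dict.empty).getD q.2 0 = 0 := by
        rw [getD2_foldl_not_mem _ _ q (by
          rw [PySem.Dict.items_counter, List.map_map]
          simpa using fun h => hmem ((PySem.Set.mem_ofList xs q).1 h))]
        simp [PySem.Dict.getD_empty]
      show nstep _ (q, 1) = bstep _ q
      simp only [bstep]
      rw [h0]
      simp [nstep]

theorem foldA_eq (l : List ((String × String) × Int))
    (m : PySem.Dict String (PySem.Dict String Int)) :
    l.foldl (fun model p =>
        let model := if model.contains p.1.1 then model else model.insert p.1.1 PySem.Dict.empty
        model.insert p.1.1 ((model.getD p.1.1 PySem.Dict.empty).insert p.1.2 p.2)) m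
      = l.foldl nstep m := by
  induction l generalizing m with
  | nil => rfl
  | cons p t ih => rw [List.foldl_cons, List.foldl_cons, astep_eq, ih]

-- ===== B-side characterisation =====

theorem innerF_filter (l : List (String × String)) (k : String)
    (f0 : PySem.Dict String Int) :
    l.foldl
        (fun followers q =>
          if q.1 == k then followers.insert q.2 (followers.getD q.2 0 + 1) else followers)
        f0
      = ((l.filter (fun q => q.1 == k)).map (·.2)).foldl
          (fun d x => d.insert x (d.getD x 0 + 1)) f0 := by
  induction l generalizing f0 with
  | nil => rfl
  | cons q t ih =>
    by_cases h : q.1 == k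
    · simp only [List.foldl_cons, List.filter_cons, h, if_true, List.map_cons]
      exact ih _
    · simp only [List.foldl_cons, List.filter_cons, h, if_false, Bool.false_eq_true]
      exact ih f0

theorem innerF_eq_counter (l : List (String × String)) (k : String) :
    innerF l k = PySem.Dict.counter ((l.filter (fun q => q.1 == k)).map (·.2)) := by
  rw [innerF, innerF_filter, PySem.Dict.foldl_insert_getD_add_one_eq_counter]

theorem getD_foldl_bstep (l : List (String × String))
    (m : PySem.Dict String (PySem.Dict String Int)) (k : String) :
    (l.foldl bstep m).getD k PySem.Dict.empty
      = ((l.filter (fun q => q.1 == k)).map (·.2)).foldl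
          (fun d x => d.insert x (d.getD x 0 + 1)) (m.getD k PySem.Dict.empty) := by
  induction l generalizing m with
  | nil => rfl
  | cons q t ih =>
    rw [List.foldl_cons, ih]
    by_cases h : q.1 = k
    · simp only [List.filter_cons, show (q.1 == k) = true by simp [h], if_true,
        List.map_cons, List.foldl_cons]
      congr 1
      have hk : k = q.1 := h.symm
      simp [bstep, updN, hk]
    · simp only [List.filter_cons, show (q.1 == k) = false by simp [h], Bool.false_eq_true,
        if_false]
      congr 1
      have hne : k ≠ q.1 := fun hh => h hh.symm
      simp [bstep, updN, PySem.Dict.getD_insert, hne]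

theorem getD_foldl_bstep_counter (l : List (String × String)) (k : String) :
    (l.foldl bstep PySem.Dict.empty).getD k PySem.Dict.empty
      = PySem.Dict.counter ((l.filter (fun q => q.1 == k)).map (·.2)) := by
  rw [getD_foldl_bstep, PySem.Dict.getD_empty,
    PySem.Dict.foldl_insert_getD_add_one_eq_counter]

theorem keys_foldl_bstep (l : List (String × String))
    (m : PySem.Dict String (PySem.Dict String Int)) :
    (l.foldl bstep m).keys = PySem.Set.update m.keys (l.map (·.1)) := by
  induction l generalizing m with
  | nil => rfl
  | cons q t ih =>
    rw [List.foldl_cons, ih, List.map_cons, PySem.Set.update_cons]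
    congr 1
    show (updN m q _).keys = _
    unfold updN
    by_cases hc : m.contains q.1 = true
    · rw [PySem.Dict.keys_insert_of_contains _ _ hc,
        PySem.Set.add_of_mem ((PySem.Dict.contains_iff_mem_keys _ _).1 hc)]
    · rw [PySem.Dict.keys_insert_of_not_contains _ _ (by simpa using hc),
        PySem.Set.add_of_not_mem
          (fun h => hc ((PySem.Dict.contains_iff_mem_keys _ _).2 h))]

theorem nodup_keys_foldl_bstep (l : List (String × String)) :
    (l.foldl bstep PySem.Dict.empty).keys.Nodup := by
  rw [keys_foldl_bstep, PySem.Dict.keys_empty]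
  exact PySem.Set.nodup_update _ _ List.nodup_nil

theorem keys_foldl_gstep (w : List (String × String)) (l : List (String × String))
    (m : PySem.Dict String (PySem.Dict String Int)) :
    (l.foldl (gstep w) m).keys = PySem.Set.update m.keys (l.map (·.1)) := by
  induction l generalizing m with
  | nil => rfl
  | cons q t ih =>
    rw [List.foldl_cons, ih, List.map_cons, PySem.Set.update_cons]
    congr 1
    unfold gstep
    by_cases hc : m.contains q.1 = true
    · rw [if_pos hc, PySem.Set.add_of_mem ((PySem.Dict.contains_iff_mem_keys _ _).1 hc)]
    · rw [if_neg hc, PySem.Dict.keys_insert_of_not_contains _ _ (by simpa using hc),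
        PySem.Set.add_of_not_mem
          (fun h => hc ((PySem.Dict.contains_iff_mem_keys _ _).2 h))]

theorem nodup_keys_foldl_gstep (w : List (String × String)) (l : List (String × String)) :
    (l.foldl (gstep w) PySem.Dict.empty).keys.Nodup := by
  rw [keys_foldl_gstep, PySem.Dict.keys_empty]
  exact PySem.Set.nodup_update _ _ List.nodup_nil

theorem getD_foldl_gstep_of_contains (w : List (String × String))
    (l : List (String × String)) (m : PySem.Dict String (PySem.Dict String Int))
    (k : String) (hc : m.contains k = true) :
    (l.foldl (gstep w) m).getD k PySem.Dict.empty = m.getD k PySem.Dict.empty := by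
  induction l generalizing m with
  | nil => rfl
  | cons q t ih =>
    rw [List.foldl_cons]
    by_cases hq : m.contains q.1 = true
    · rw [show gstep w m q = m from by unfold gstep; rw [if_pos hq]]
      exact ih m hc
    · have hne : k ≠ q.1 := fun h => hq (h ▸ hc)
      rw [show gstep w m q = m.insert q.1 (innerF w q.1) from by unfold gstep; rw [if_neg hq],
        ih _ (by simp [PySem.Dict.contains_insert, hc]),
        PySem.Dict.getD_insert, if_neg hne]

theorem getD_foldl_gstep_of_mem (w : List (String × String))
    (l : List (String × String)) (m : PySem.Dict String (PySem.Dict String Int))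
    (k : String) (hc : m.contains k = false) (hmem : k ∈ l.map (·.1)) :
    (l.foldl (gstep w) m).getD k PySem.Dict.empty = innerF w k := by
  induction l generalizing m with
  | nil => simp at hmem
  | cons q t ih =>
    rw [List.foldl_cons]
    by_cases hqk : q.1 = k
    · have : gstep w m q = m.insert q.1 (innerF w q.1) := by
        unfold gstep; rw [if_neg (by rw [hqk, hc]; simp)]
      rw [this, hqk,
        getD_foldl_gstep_of_contains w t _ k (PySem.Dict.contains_insert_self _ _ _),
        PySem.Dict.getD_insert, if_pos rfl]
    · have hmem' : k ∈ t.map (·.1) := by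
        rcases List.mem_cons.1 hmem with h | h
        · exact absurd h.symm hqk
        · exact h
      by_cases hq : m.contains q.1 = true
      · rw [show gstep w m q = m from by unfold gstep; rw [if_pos hq]]
        exact ih m hc hmem'
      · have hne : k ≠ q.1 := fun hh => hqk hh.symm
        rw [show gstep w m q = m.insert q.1 (innerF w q.1) from by unfold gstep; rw [if_neg hq]]
        exact ih _ (by simp [PySem.Dict.contains_insert, hc, hne]) hmem'

theorem foldl_gstep_eq_foldl_bstep (l : List (String × String)) :
    l.foldl (gstep l) PySem.Dict.empty = l.foldl bstep PySem.Dict.empty := by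
  apply PySem.Dict.ext
  rw [PySem.Dict.items_eq_map_keys _ (nodup_keys_foldl_gstep l l) PySem.Dict.empty,
    PySem.Dict.items_eq_map_keys _ (nodup_keys_foldl_bstep l) PySem.Dict.empty,
    keys_foldl_gstep, keys_foldl_bstep]
  apply List.map_congr_left
  intro k hk
  have hmem : k ∈ l.map (·.1) := by
    rw [PySem.Dict.keys_empty, PySem.Set.update_nil_left] at hk
    exact (PySem.Set.mem_ofList _ k).1 hk
  rw [getD_foldl_gstep_of_mem l l PySem.Dict.empty k (PySem.Dict.contains_empty _) hmem,
    getD_foldl_bstep_counter, innerF_eq_counter]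

-- ===== VERDICT (by name: the statement is the Claim_ definition above) =====
theorem build_bigram_spec : Claim_equal_build_bigram := by
  intro sequence _
  show build_bigram sequence = build_bigram_alt sequence
  simp only [build_bigram, build_bigram_alt, foldA_eq, nest_counter]
  rw [show (fun (model : PySem.Dict String (PySem.Dict String Int)) (p : String × String) =>
      if model.contains p.1 then model
      else model.insert p.1
        ((sequence.zip (sequence.drop 1)).foldl
          (fun followers q =>
            if q.1 == p.1 then followers.insert q.2 (followers.getD q.2 0 + 1)
            else followers)
          PySem.Dict.empty)) = gstep (sequence.zip (sequence.drop 1)) from rfl]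
  rw [foldl_gstep_eq_foldl_bstep]
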